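-- pv_equiv track=rewrite | github.com/BIM-Woo/boj_study | boj study/Herdle.py | count_highlights
-- ===== SOURCE A (Python) =====
-- def count_highlights(answer_grid, guess_grid):
--     from collections import Counter
--
--     green_count = 0
--     yellow_count = 0
--
--     # 초록색(정확히 일치) 찾기
--     answer_positions = {}  # 정답 위치 추적
--     guess_positions = {}   # 추측 위치 추적
--     answer_counter = Counter()  # 정답 문자 빈도수
--     guess_counter = Counter()   # 추측 문자 빈도수
--
--     for i in range(3):
--         for j in range(3):
--             ans_char = answer_grid[i][j]
--             guess_char = guess_grid[i][j]
--
--             if ans_char == guess_char: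
--                 green_count += 1  # 초록색 증가
--             else:
--                 answer_counter[ans_char] += 1
--                 guess_counter[guess_char] += 1
--
--     # 노란색(위치는 다르지만 존재) 찾기
--     for char in guess_counter:
--         if char in answer_counter:
--             yellow_count += min(answer_counter[char], guess_counter[char])
--
--     return green_count, yellow_count
-- ===== SOURCE B (Python) =====
-- def count_highlights(answer_grid, guess_grid):
--     ans = [answer_grid[i][j] for i in range(3) for j in range(3)]
--     gus = [guess_grid[i][j] for i in range(3) for j in range(3)]
--     green = sum(a == b for a, b in zip(ans, gus))
--     total = sum(min(ans.count(c), gus.count(c)) for c in set(ans))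
--     return green, total - green
-- ===== Notes on version B (the rewrite author's own statement) =====
-- stated objective: alternative
-- what changed: B flattens both grids once, counts greens by direct cell comparison, and derives yellow arithmetically as (total per-character frequency overlap of the FULL grids) minus green, instead of A's incremental leftover-only counters plus a key-intersection loop.
import Mathlib
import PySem

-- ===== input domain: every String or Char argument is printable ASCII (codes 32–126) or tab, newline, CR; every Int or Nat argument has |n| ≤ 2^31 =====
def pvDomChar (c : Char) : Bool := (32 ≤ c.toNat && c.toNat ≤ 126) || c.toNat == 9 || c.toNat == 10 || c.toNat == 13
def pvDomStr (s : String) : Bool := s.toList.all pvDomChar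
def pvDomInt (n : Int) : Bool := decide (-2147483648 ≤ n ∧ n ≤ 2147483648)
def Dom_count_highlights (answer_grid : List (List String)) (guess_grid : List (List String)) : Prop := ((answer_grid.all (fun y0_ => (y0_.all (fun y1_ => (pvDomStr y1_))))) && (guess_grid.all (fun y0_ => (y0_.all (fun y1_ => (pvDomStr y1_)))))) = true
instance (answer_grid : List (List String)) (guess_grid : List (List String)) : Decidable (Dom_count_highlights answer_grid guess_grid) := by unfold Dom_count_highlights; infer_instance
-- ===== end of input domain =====

-- B computes yellow as total full-grid frequency overlap minus green instead of A's
-- leftover-only counters with a key-intersection loop (objective: alternative decomposition).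

-- ===== PORT A =====
-- grid[i][j]; total form of the IndexError-raising lookup, exact under Pre_ (in range)
def pvCell (grid : List (List String)) (i j : Int) : String :=
  (((PySem.List.pyGet? grid i).getD []) |> (PySem.List.pyGet? · j)).getD ""

-- the loop body: green on match, else count ans_char / guess_char into the two Counters
def pvStepA (s : Int × PySem.Dict String Int × PySem.Dict String Int)
    (ans_char guess_char : String) : Int × PySem.Dict String Int × PySem.Dict String Int :=
  if ans_char == guess_char then (s.1 + 1, s.2.1, s.2.2)
  else (s.1, s.2.1.insert ans_char (s.2.1.getD ans_char 0 + 1),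
        s.2.2.insert guess_char (s.2.2.getD guess_char 0 + 1))

def count_highlights (answer_grid : List (List String)) (guess_grid : List (List String)) : Int × Int :=
  let s := (PySem.List.pyRange 0 3 1).foldl (fun s i =>
    (PySem.List.pyRange 0 3 1).foldl (fun s j =>
      pvStepA s (pvCell answer_grid i j) (pvCell guess_grid i j)) s)
    ((0 : Int), (PySem.Dict.empty : PySem.Dict String Int), (PySem.Dict.empty : PySem.Dict String Int))
  let yellow := s.2.2.keys.foldl (fun y c =>
    if s.2.1.contains c then y + min (s.2.1.getD c 0) (s.2.2.getD c 0) else y) (0 : Int)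
  (s.1, yellow)

-- ===== PORT B =====
def count_highlights_alt (answer_grid : List (List String)) (guess_grid : List (List String)) : Int × Int :=
  let ans := (PySem.List.pyRange 0 3 1).flatMap (fun i => (PySem.List.pyRange 0 3 1).map (fun j => pvCell answer_grid i j))
  let gus := (PySem.List.pyRange 0 3 1).flatMap (fun i => (PySem.List.pyRange 0 3 1).map (fun j => pvCell guess_grid i j))
  let green := ((ans.zip gus).map (fun p => if p.1 == p.2 then (1 : Int) else 0)).sum
  let total := ((PySem.Set.ofList ans).map (fun c => (min (ans.count c) (gus.count c) : Int))).sum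
  (green, total - green)

-- ===== PRECONDITION & SPEC =====
-- Pre_: both grids have at least 3 rows whose first 3 rows each have at least 3 cells — exactly where A's grid[i][j] (i,j < 3) does not raise IndexError.
def Pre_count_highlights (answer_grid : List (List String)) (guess_grid : List (List String)) : Prop :=
  3 ≤ answer_grid.length ∧ 3 ≤ guess_grid.length ∧
  (∀ r ∈ answer_grid.take 3, 3 ≤ r.length) ∧ (∀ r ∈ guess_grid.take 3, 3 ≤ r.length)
instance (answer_grid : List (List String)) (guess_grid : List (List String)) : Decidable (Pre_count_highlights answer_grid guess_grid) := by unfold Pre_count_highlights; infer_instance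

def pvWitness_count_highlights : List (List String) × List (List String) :=
  ([["a","b","c"],["d","e","f"],["g","h","a"]], [["a","c","b"],["d","d","a"],["x","y","z"]])

def Spec_count_highlights (answer_grid : List (List String)) (guess_grid : List (List String)) (out : Int × Int) : Prop := out = count_highlights_alt answer_grid guess_grid
instance (answer_grid : List (List String)) (guess_grid : List (List String)) (out : Int × Int) : Decidable (Spec_count_highlights answer_grid guess_grid out) := by unfold Spec_count_highlights; infer_instance

-- ===== CLAIM (what is proved, stated in full; the proofs are below) =====
def Claim_equal_count_highlights : Prop := ∀ (answer_grid : List (List String)) (guess_grid : List (List String)), Dom_count_highlights answer_grid guess_grid → Pre_count_highlights answer_grid guess_grid → Spec_count_highlights answer_grid guess_grid (count_highlights answer_grid guess_grid)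

-- ===== LEMMAS AND PROOFS =====

-- A's step on one cell pair
def pvIns (d : PySem.Dict String Int) (x : String) : PySem.Dict String Int := d.insert x (d.getD x 0 + 1)

-- the 9 cell pairs both programs visit, in order
def pvPairs (a g : List (List String)) : List (String × String) :=
  [(pvCell a 0 0, pvCell g 0 0), (pvCell a 0 1, pvCell g 0 1), (pvCell a 0 2, pvCell g 0 2),
   (pvCell a 1 0, pvCell g 1 0), (pvCell a 1 1, pvCell g 1 1), (pvCell a 1 2, pvCell g 1 2),
   (pvCell a 2 0, pvCell g 2 0), (pvCell a 2 1, pvCell g 2 1), (pvCell a 2 2, pvCell g 2 2)]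


def pvAStep (s : Int × PySem.Dict String Int × PySem.Dict String Int) (p : String × String) :
    Int × PySem.Dict String Int × PySem.Dict String Int :=
  pvStepA s p.1 p.2

-- the nested index loop visits exactly the 9 cell pairs, for ANY step function
theorem pvNestedFold {σ : Type} (F : σ → String → String → σ) (a g : List (List String)) (init : σ) :
    (PySem.List.pyRange 0 3 1).foldl (fun s i =>
      (PySem.List.pyRange 0 3 1).foldl (fun s j => F s (pvCell a i j) (pvCell g i j)) s) init
    = (pvPairs a g).foldl (fun s p => F s p.1 p.2) init := rfl

def pvEq (p : String × String) : Bool := p.1 == p.2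

def pvARes (ps : List (String × String)) : Int × Int :=
  let s := ps.foldl pvAStep ((0 : Int), PySem.Dict.empty, PySem.Dict.empty)
  (s.1, s.2.2.keys.foldl (fun y c =>
    if s.2.1.contains c then y + min (s.2.1.getD c 0) (s.2.2.getD c 0) else y) (0 : Int))

def pvBRes (ps : List (String × String)) : Int × Int :=
  let green := (ps.map (fun p => if p.1 == p.2 then (1 : Int) else 0)).sum
  let total := ((PySem.Set.ofList (ps.map Prod.fst)).map
      (fun c => (min ((ps.map Prod.fst).count c) ((ps.map Prod.snd).count c) : Int))).sum
  (green, total - green)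

theorem pvPortA_pairs (a g : List (List String)) : count_highlights a g = pvARes (pvPairs a g) := by
  unfold count_highlights pvARes
  exact congrArg (fun s : Int × PySem.Dict String Int × PySem.Dict String Int =>
      (s.1, s.2.2.keys.foldl (fun y c =>
        if s.2.1.contains c then y + min (s.2.1.getD c 0) (s.2.2.getD c 0) else y) (0 : Int)))
    (pvNestedFold pvStepA a g _)

set_option maxHeartbeats 2000000 in
theorem pvPortB_pairs (a g : List (List String)) : count_highlights_alt a g = pvBRes (pvPairs a g) := rfl

-- A's main loop: green counts the equal pairs; the dicts fold the unequal pairs' components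
theorem pvLoopA (ps : List (String × String)) (n : Int) (d1 d2 : PySem.Dict String Int) :
    ps.foldl pvAStep (n, d1, d2) =
      (n + (ps.countP pvEq : Int),
       ((ps.filter (fun p => !pvEq p)).map Prod.fst).foldl pvIns d1,
       ((ps.filter (fun p => !pvEq p)).map Prod.snd).foldl pvIns d2) := by
  induction ps generalizing n d1 d2 with
  | nil => simp
  | cons p ps ih =>
    by_cases h : p.1 == p.2 <;>
      simp [pvAStep, pvStepA, pvIns, pvEq, h, ih, Prod.ext_iff] <;> omega

-- cast a Nat-valued sum to Int termwise
theorem pvCastSum (l : List String) (f : String → ℕ) :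
    (l.map (fun c => ((f c : ℕ) : ℤ))).sum = ((l.map f).sum : ℤ) := by
  induction l with | nil => simp | cons x xs ih => simp [ih]

-- sums of a Nat function over two nodup lists agree when the function vanishes off the smaller
theorem pvSumExt (l1 l2 : List String) (f : String → ℕ) (h1 : l1.Nodup) (h2 : l2.Nodup)
    (hsub : ∀ c ∈ l1, c ∈ l2) (hz : ∀ c ∈ l2, c ∉ l1 → f c = 0) :
    (l1.map f).sum = (l2.map f).sum := by
  rw [← List.sum_toFinset _ h1, ← List.sum_toFinset _ h2]
  refine Finset.sum_subset (fun c hc => ?_) (fun c hc hnc => ?_) <;>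
    simp only [List.mem_toFinset] at *
  · exact hsub c hc
  · exact hz c hc hnc

-- a nodup list covering E sums E's counts to E's length
theorem pvSumCount (l : List String) (E : List String) (h : l.Nodup)
    (hsub : ∀ c ∈ E, c ∈ l) : (l.map (fun c => E.count c)).sum = E.length := by
  rw [← List.sum_toFinset _ h]
  rw [← Finset.sum_subset (s₁ := E.toFinset)
        (fun c hc => by simp only [List.mem_toFinset] at *; exact hsub c hc)
        (fun c _ hnc => by simp only [List.mem_toFinset] at hnc; exact List.count_eq_zero.mpr hnc)]
  exact List.sum_toFinset_count_eq_length E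

-- counting a component over a list of pairs is a countP on the pairs
theorem pvCountFst (l : List (String × String)) (c : String) :
    List.count c (l.map Prod.fst) = l.countP (fun p => p.1 == c) := by
  rw [List.count_eq_countP, List.countP_map]; rfl

theorem pvCountSnd (l : List (String × String)) (c : String) :
    List.count c (l.map Prod.snd) = l.countP (fun p => p.2 == c) := by
  rw [List.count_eq_countP, List.countP_map]; rfl

-- the heart of the equivalence: total full-grid overlap = leftover overlap + number of greens
theorem pvCentral (ps : List (String × String)) :
    (((PySem.Set.ofList (ps.map Prod.fst)) : List String).map
        (fun c => min (List.count c (ps.map Prod.fst)) (List.count c (ps.map Prod.snd)))).sum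
    = (((PySem.Set.ofList ((ps.filter (fun p => !pvEq p)).map Prod.snd)) : List String).map
        (fun c => min (List.count c ((ps.filter (fun p => !pvEq p)).map Prod.fst))
                      (List.count c ((ps.filter (fun p => !pvEq p)).map Prod.snd)))).sum
      + ps.countP pvEq := by
  set as := ps.map Prod.fst with has
  set gs := ps.map Prod.snd with hgs
  set N := ps.filter (fun p => !pvEq p) with hN
  set E := ps.filter pvEq with hE
  set U : List String := PySem.Set.ofList (as ++ gs) with hU
  have hUnd : U.Nodup := PySem.Set.nodup_ofList _
  have hmemU : ∀ c, c ∈ as ++ gs → c ∈ U := fun c hc => (PySem.Set.mem_ofList _ c).mpr hc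
  -- pointwise decomposition of the full counts
  have hsplitA : ∀ c, List.count c as = List.count c (N.map Prod.fst) + List.count c (E.map Prod.fst) := by
    intro c
    rw [has, pvCountFst, pvCountFst, pvCountFst,
      List.countP_eq_countP_filter_add ps (fun p => p.1 == c) pvEq]
    simp only [← hN, ← hE]
    omega
  have hEeq : ∀ c, List.count c (E.map Prod.snd) = List.count c (E.map Prod.fst) := by
    intro c
    rw [pvCountFst, pvCountSnd]
    refine List.countP_congr (fun p hp => ?_)
    have hpe : pvEq p = true := (List.mem_filter.mp hp).2
    have : p.1 = p.2 := by simpa [pvEq] using hpe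
    rw [this]
  have hsplitG : ∀ c, List.count c gs = List.count c (N.map Prod.snd) + List.count c (E.map Prod.fst) := by
    intro c
    rw [hgs, pvCountSnd, ← hEeq c, pvCountSnd, pvCountSnd,
      List.countP_eq_countP_filter_add ps (fun p => p.2 == c) pvEq]
    simp only [← hN, ← hE]
    omega
  -- move both sums to the common index list U
  have h1 : ((PySem.Set.ofList as : List String).map
      (fun c => min (List.count c as) (List.count c gs))).sum
      = (U.map (fun c => min (List.count c as) (List.count c gs))).sum := by
    refine pvSumExt _ _ _ (PySem.Set.nodup_ofList _) hUnd (fun c hc => ?_) (fun c _ hc => ?_)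
    · exact hmemU c (List.mem_append_left _ ((PySem.Set.mem_ofList _ c).mp hc))
    · have : c ∉ as := fun h => hc ((PySem.Set.mem_ofList _ c).mpr h)
      simp [List.count_eq_zero.mpr this]
  have h2 : ((PySem.Set.ofList (N.map Prod.snd) : List String).map
      (fun c => min (List.count c (N.map Prod.fst)) (List.count c (N.map Prod.snd)))).sum
      = (U.map (fun c => min (List.count c (N.map Prod.fst)) (List.count c (N.map Prod.snd)))).sum := by
    refine pvSumExt _ _ _ (PySem.Set.nodup_ofList _) hUnd (fun c hc => ?_) (fun c _ hc => ?_)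
    · refine hmemU c (List.mem_append_right _ ?_)
      have hsub : N ⊆ ps := fun x hx => List.mem_of_mem_filter hx
      exact hgs ▸ List.map_subset Prod.snd hsub ((PySem.Set.mem_ofList _ c).mp hc)
    · have : c ∉ N.map Prod.snd := fun h => hc ((PySem.Set.mem_ofList _ c).mpr h)
      simp [List.count_eq_zero.mpr this]
  -- sum the greens-per-character over U
  have h3 : (U.map (fun c => List.count c (E.map Prod.fst))).sum = E.length := by
    have := pvSumCount U (E.map Prod.fst) hUnd (fun c hc => ?_)
    · simpa using this
    · refine hmemU c (List.mem_append_left _ ?_)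
      have hsub : E ⊆ ps := fun x hx => List.mem_of_mem_filter hx
      exact has ▸ List.map_subset Prod.fst hsub hc
  have h4 : E.length = ps.countP pvEq := (List.countP_eq_length_filter).symm ▸ rfl
  rw [h1, h2]
  have hpt : (fun c => min (List.count c as) (List.count c gs))
      = fun c => min (List.count c (N.map Prod.fst)) (List.count c (N.map Prod.snd))
          + List.count c (E.map Prod.fst) := by
    funext c
    rw [hsplitA c, hsplitG c]
    omega
  rw [hpt, List.sum_map_add, h3, hE, List.countP_eq_length_filter]

-- fold-with-guard as a sum
theorem pvFoldGuard (L : List String) (P : String → Bool) (m : String → Int) :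
    L.foldl (fun y c => if P c then y + m c else y) 0 = (L.map (fun c => if P c then m c else 0)).sum := by
  have h : (fun (y : Int) c => if P c then y + m c else y)
      = fun y c => y + (if P c then m c else 0) := by
    funext y c; by_cases h : P c <;> simp [h]
  rw [h, PySem.List.foldl_add]; simp

theorem pvInsCounter (xs : List String) :
    xs.foldl pvIns PySem.Dict.empty = PySem.Dict.counter xs :=
  PySem.Dict.foldl_insert_getD_add_one_eq_counter xs

-- A's and B's pair-level results coincide
theorem pvAB (ps : List (String × String)) : pvARes ps = pvBRes ps := by
  unfold pvARes pvBRes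
  rw [pvLoopA]
  rw [show ((ps.filter (fun p => !pvEq p)).map Prod.fst).foldl pvIns PySem.Dict.empty
        = PySem.Dict.counter ((ps.filter (fun p => !pvEq p)).map Prod.fst) from pvInsCounter _,
      show ((ps.filter (fun p => !pvEq p)).map Prod.snd).foldl pvIns PySem.Dict.empty
        = PySem.Dict.counter ((ps.filter (fun p => !pvEq p)).map Prod.snd) from pvInsCounter _]
  have hg : (ps.map (fun p => if p.1 == p.2 then (1 : Int) else 0)).sum = (ps.countP pvEq : Int) := by
    simpa [pvEq] using PySem.List.sum_map_ite_one_zero pvEq ps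
  refine Prod.ext (by rw [zero_add, ← hg]) ?_
  simp only [PySem.Dict.keys_counter, PySem.Dict.contains_counter, PySem.Dict.getD_counter,
    pvFoldGuard, hg]
  have hterm : (fun c => if ((ps.filter (fun p => !pvEq p)).map Prod.fst).contains c
        then min ((List.count c ((ps.filter (fun p => !pvEq p)).map Prod.fst) : Int))
                 ((List.count c ((ps.filter (fun p => !pvEq p)).map Prod.snd) : Int)) else 0)
      = fun c => ((min (List.count c ((ps.filter (fun p => !pvEq p)).map Prod.fst))
                       (List.count c ((ps.filter (fun p => !pvEq p)).map Prod.snd)) : ℕ) : Int) := by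
    funext c
    by_cases hc : c ∈ (ps.filter (fun p => !pvEq p)).map Prod.fst
    · rw [if_pos (List.contains_iff_mem.mpr hc)]
      exact (Nat.cast_min _ _).symm
    · have h0 : List.count c ((ps.filter (fun p => !pvEq p)).map Prod.fst) = 0 :=
        List.count_eq_zero.mpr hc
      have : ¬ ((ps.filter (fun p => !pvEq p)).map Prod.fst).contains c = true := by
        simpa [List.contains_iff_mem] using hc
      rw [if_neg (by simpa using this)]
      simp [h0]
  rw [hterm, pvCastSum]
  simp only [← Nat.cast_min]
  rw [pvCastSum]
  have := pvCentral ps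
  omega

theorem count_highlights_spec : Claim_equal_count_highlights := by
  intro a g _ _
  unfold Spec_count_highlights
  rw [pvPortA_pairs, pvPortB_pairs, pvAB]
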